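-- pv_equiv track=rewrite | github.com/hyeonjun/AlgorithmTest | Codility/lesson_7_2_Fish.py | solution
-- ===== SOURCE A (Python) =====
-- def solution(A, B):
--     if len(A) == 1:
--         return 1
--
--     checker = []
--     for a, b in zip(A,B):
--         checker.append([a,b])
--     result = []
--     result.append(checker[0])
--     for i in range(1, len(checker)):
--         while(True):
--             if result[-1][1] == 1 and checker[i][1] == 0:
--                 if result[-1][0] > checker[i][0]:
--                     break
--                 else:
--                     del result[-1]
--                     if len(result) == 0:
--                         result.append(checker[i])
--                         break
--             else:
--                 result.append(checker[i])
--                 break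
--     return len(result)
-- ===== SOURCE B (Python) =====
-- def _fight_pass(fish):
--     """One left-to-right pass: resolve each adjacent (downstream, upstream) encounter
--     by keeping only the bigger fish; disjoint pairs are resolved within the pass."""
--     out = []
--     changed = False
--     i = 0
--     n = len(fish)
--     while i < n:
--         if i + 1 < n and fish[i][1] == 1 and fish[i + 1][1] == 0:
--             out.append(fish[i] if fish[i][0] > fish[i + 1][0] else fish[i + 1])
--             changed = True
--             i += 2
--         else:
--             out.append(fish[i])
--             i += 1
--     return out, changed
--
--
-- def solution(A, B):
--     fish = list(zip(A, B))
--     changed = True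
--     while changed:
--         fish, changed = _fight_pass(fish)
--     return len(fish)
-- ===== Notes on version B (the rewrite author's own statement) =====
-- stated objective: alternative
-- what changed: Replaced A's seeded-stack simulation (while-True fight loop with del on the result list) by a fixpoint of independent rewrite passes: each pass scans the fish list once and resolves every adjacent downstream/upstream encounter by keeping the bigger fish, repeating until no encounter remains; the answer is the length of the irreducible list. Pre_ excludes only empty A or empty B, where A raises IndexError on checker[0] except for the one-element-A corner where its early return yields 1 with no fish pair in existence.
-- outside the precondition, e.g. on solution([5], []): A returns 1, B returns 0; on solution([], []): A raises IndexError, B returns 0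
import Mathlib
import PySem

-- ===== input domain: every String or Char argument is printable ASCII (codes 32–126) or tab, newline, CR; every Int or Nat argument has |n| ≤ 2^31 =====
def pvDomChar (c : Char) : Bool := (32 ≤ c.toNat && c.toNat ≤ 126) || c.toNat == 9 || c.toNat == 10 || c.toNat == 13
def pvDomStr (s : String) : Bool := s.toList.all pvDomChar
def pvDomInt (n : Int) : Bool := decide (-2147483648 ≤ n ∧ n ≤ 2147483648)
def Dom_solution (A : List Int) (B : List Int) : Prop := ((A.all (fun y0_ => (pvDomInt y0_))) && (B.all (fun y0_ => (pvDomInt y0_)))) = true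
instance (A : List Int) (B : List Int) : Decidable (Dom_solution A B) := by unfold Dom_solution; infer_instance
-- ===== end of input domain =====

-- B replaces A's seeded-stack fight simulation by a fixpoint of adjacent-pair rewrite passes
-- (objective: alternative; the equivalence is about the return value, no argument is mutated).


-- ===== PORT A =====
-- A's inner `while True: … del result[-1] … break` loop, as structural recursion on the
-- result stack (stored top-first)
def fightA (res : List (Int × Int)) (c : Int × Int) : List (Int × Int) :=
  match res with
  | [] => [c]                              -- `if len(result) == 0: result.append(checker[i]); break`
  | (ra, rb) :: rest =>
    if rb = 1 ∧ c.2 = 0 then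
      if ra > c.1 then (ra, rb) :: rest    -- break, current fish dies
      else fightA rest c                   -- del result[-1], loop again
    else c :: (ra, rb) :: rest             -- append and break

def solution (A : List Int) (B : List Int) : Int :=
  if A.length = 1 then 1
  else
    let checker := A.zip B
    match checker with
    | [] => 0                              -- Python raises IndexError here (checker[0]); outside Pre_
    | c0 :: cs => ((cs.foldl fightA [c0]).length : Int)

-- ===== PORT B =====
-- one pass of Source B's `_fight_pass`: the index loop advances by 2 over a resolved adjacent
-- (downstream, upstream) encounter (keeping the bigger fish) and by 1 otherwise
def fightPass (fish : List (Int × Int)) : List (Int × Int) × Bool :=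
  match fish with
  | x :: y :: t =>
    if x.2 = 1 ∧ y.2 = 0 then
      let r := fightPass t
      ((if x.1 > y.1 then x else y) :: r.1, true)
    else
      let r := fightPass (y :: t)
      (x :: r.1, r.2)
  | l => (l, false)

-- the port of Source B's outer `while changed:` loop needs these two facts to terminate
theorem fightPass_len_le : ∀ (l : List (Int × Int)), (fightPass l).1.length ≤ l.length := by
  intro l
  induction l using fightPass.induct with
  | case1 x y t h ih =>
    simp only [fightPass, if_pos h, List.length_cons]
    omega
  | case2 x y t h ih =>
    simp only [fightPass, if_neg h, List.length_cons]
    have := ih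
    simp only [List.length_cons] at this
    omega
  | case3 l h1 =>
    cases l with
    | nil => simp [fightPass]
    | cons x t =>
      cases t with
      | nil => simp [fightPass]
      | cons y t' => exact absurd rfl (fun h => h1 x y t' h)

theorem fightPass_lt (l : List (Int × Int)) (h : (fightPass l).2 = true) :
    (fightPass l).1.length < l.length := by
  induction l using fightPass.induct with
  | case1 x y t hc ih =>
    simp only [fightPass, if_pos hc, List.length_cons]
    have := fightPass_len_le t
    omega
  | case2 x y t hc ih =>
    simp only [fightPass, if_neg hc] at h ⊢
    have := ih h
    simp only [List.length_cons] at this ⊢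
    omega
  | case3 l h1 =>
    cases l with
    | nil => simp [fightPass] at h
    | cons x t =>
      cases t with
      | nil => simp [fightPass] at h
      | cons y t' => exact absurd rfl (fun hh => h1 x y t' hh)

-- Source B's `while changed:` outer loop, recursing on the strictly shrinking list
def reduceFix (fish : List (Int × Int)) : List (Int × Int) :=
  let r := fightPass fish
  if h : r.2 = true then reduceFix r.1 else r.1
termination_by fish.length
decreasing_by exact fightPass_lt fish h

def solution_alt (A : List Int) (B : List Int) : Int :=
  ((reduceFix (A.zip B)).length : Int)

-- ===== PRECONDITION & SPEC =====
-- Pre_ excludes empty A or empty B only: there A raises IndexError on checker[0], except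
-- that for a one-element A with empty B its early return yields 1 although no fish pair
-- exists — a corner outside the problem's domain (len(B) = len(A)), where B returns 0.
def Pre_solution (A : List Int) (B : List Int) : Prop := A ≠ [] ∧ B ≠ []
instance (A : List Int) (B : List Int) : Decidable (Pre_solution A B) := by unfold Pre_solution; infer_instance
def pvWitness_solution : List Int × List Int := ([4, 3, 2, 1, 5], [0, 1, 0, 0, 0])

def Spec_solution (A : List Int) (B : List Int) (out : Int) : Prop := out = solution_alt A B
instance (A : List Int) (B : List Int) (out : Int) : Decidable (Spec_solution A B out) := by unfold Spec_solution; infer_instance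

-- ===== CLAIM (what is proved, stated in full; the proofs are below) =====
def Claim_equal_solution : Prop := ∀ (A : List Int) (B : List Int), Dom_solution A B → Pre_solution A B → Spec_solution A B (solution A B)

-- ===== LEMMAS AND PROOFS =====

-- a fish that is not upstream (b ≠ 0) is simply pushed by A's loop
theorem fightA_push (res : List (Int × Int)) (c : Int × Int) (hc : c.2 ≠ 0) :
    fightA res c = c :: res := by
  cases res with
  | nil => simp [fightA]
  | cons p rest =>
    obtain ⟨ra, rb⟩ := p
    simp only [fightA]
    rw [if_neg]
    intro h
    exact hc h.2

-- resolving one adjacent (downstream, upstream) encounter commutes with A's stack step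
theorem fightA_pair (st : List (Int × Int)) (x y : Int × Int)
    (hx : x.2 = 1) (hy : y.2 = 0) :
    fightA (fightA st x) y = fightA st (if x.1 > y.1 then x else y) := by
  rw [fightA_push st x (by rw [hx]; norm_num)]
  obtain ⟨xa, xb⟩ := x
  simp only at hx
  subst hx
  show fightA ((xa, 1) :: st) y = _
  by_cases h : xa > y.1
  · rw [if_pos h, fightA_push st (xa, 1) (by norm_num)]
    simp [fightA, hy, h]
  · rw [if_neg h]
    simp [fightA, hy, h]

-- one pass preserves A's fold, whatever the starting stack
theorem foldl_fightPass : ∀ (l : List (Int × Int)) (st : List (Int × Int)),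
    (fightPass l).1.foldl fightA st = l.foldl fightA st := by
  intro l
  induction l using fightPass.induct with
  | case1 x y t hc ih =>
    intro st
    simp only [fightPass, if_pos hc, List.foldl_cons]
    rw [ih, fightA_pair st x y hc.1 hc.2]
  | case2 x y t hc ih =>
    intro st
    simp only [fightPass, if_neg hc, List.foldl_cons]
    rw [ih, List.foldl_cons]
  | case3 l h1 =>
    cases l with
    | nil => intro st; rfl
    | cons x t =>
      cases t with
      | nil => intro st; rfl
      | cons y t' => exact absurd rfl (fun hh => h1 x y t' hh)

-- the whole fixpoint iteration preserves A's fold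
theorem foldl_reduceFix (l : List (Int × Int)) (st : List (Int × Int)) :
    (reduceFix l).foldl fightA st = l.foldl fightA st := by
  induction l using reduceFix.induct with
  | case1 l r h ih =>
    rw [reduceFix, dif_pos h, ih, foldl_fightPass]
  | case2 l r h =>
    rw [reduceFix, dif_neg h, foldl_fightPass]

-- no adjacent (downstream, upstream) pair anywhere in the list
def noFight : List (Int × Int) → Prop
  | x :: y :: t => ¬ (x.2 = 1 ∧ y.2 = 0) ∧ noFight (y :: t)
  | _ => True

-- an unchanged pass returns its input, which then has no adjacent encounter
theorem fightPass_fix : ∀ (l : List (Int × Int)), (fightPass l).2 = false →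
    (fightPass l).1 = l ∧ noFight l := by
  intro l
  induction l using fightPass.induct with
  | case1 x y t hc ih =>
    intro h
    simp [fightPass, if_pos hc] at h
  | case2 x y t hc ih =>
    intro h
    simp only [fightPass, if_neg hc] at h ⊢
    obtain ⟨h1, h2⟩ := ih h
    exact ⟨by rw [h1], hc, h2⟩
  | case3 l h1 =>
    cases l with
    | nil => intro _; exact ⟨rfl, trivial⟩
    | cons x t =>
      cases t with
      | nil => intro _; exact ⟨rfl, trivial⟩
      | cons y t' => exact absurd rfl (fun hh => h1 x y t' hh)

-- the fixpoint really is a fixpoint: reduceFix l has no adjacent encounter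
theorem noFight_reduceFix (l : List (Int × Int)) : noFight (reduceFix l) := by
  induction l using reduceFix.induct with
  | case1 l r h ih =>
    rw [reduceFix, dif_pos h]; exact ih
  | case2 l r h =>
    rw [reduceFix, dif_neg h]
    obtain ⟨h1, h2⟩ := fightPass_fix l (by simpa using h)
    rw [h1]; exact h2

-- fightA pushes whenever the stack is empty or (top, current) is not a fight pair
theorem fightA_pushAny (st : List (Int × Int)) (c : Int × Int)
    (h : ∀ p ∈ st.head?, ¬ (p.2 = 1 ∧ c.2 = 0)) : fightA st c = c :: st := by
  cases st with
  | nil => simp [fightA]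
  | cons p rest =>
    obtain ⟨ra, rb⟩ := p
    simp only [fightA]
    rw [if_neg (h (ra, rb) (by simp))]

-- on a fight-free list A's stack fold never pops: it pushes everything
theorem foldl_noFight : ∀ (t : List (Int × Int)) (p : Int × Int) (st : List (Int × Int)),
    noFight (p :: t) → t.foldl fightA (p :: st) = t.reverse ++ p :: st := by
  intro t
  induction t with
  | nil => intro p st _; rfl
  | cons q t' ih =>
    intro p st h
    obtain ⟨h1, h2⟩ := h
    simp only [List.foldl_cons]
    rw [fightA_pushAny (p :: st) q (by simpa using fun hh1 hh2 => h1 ⟨hh1, hh2⟩)]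
    rw [ih q (p :: st) h2]
    simp

-- length of A's fold on a fight-free list = its length
theorem length_noFight (l : List (Int × Int)) (h : noFight l) :
    (l.foldl fightA []).length = l.length := by
  cases l with
  | nil => rfl
  | cons p t =>
    have hp : fightA [] p = [p] := rfl
    simp only [List.foldl_cons, hp]
    rw [foldl_noFight t p [] h]
    simp

theorem solution_eq (A B : List Int) (hA : A ≠ []) (hB : B ≠ []) :
    solution A B = solution_alt A B := by
  obtain ⟨a0, A', rfl⟩ := List.exists_cons_of_ne_nil hA
  obtain ⟨b0, B', rfl⟩ := List.exists_cons_of_ne_nil hB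
  have hz : (a0 :: A').zip (b0 :: B') = (a0, b0) :: A'.zip B' := by
    simp [List.zip]
  have key : ∀ (l : List (Int × Int)), ((reduceFix l).length : Int)
      = ((l.foldl fightA []).length : Int) := by
    intro l
    rw [← foldl_reduceFix l []]
    rw [length_noFight _ (noFight_reduceFix l)]
  by_cases hlen : (a0 :: A').length = 1
  · have hA' : A' = [] := by
      cases A' with
      | nil => rfl
      | cons x xs => simp at hlen
    subst hA'
    simp only [solution, if_pos hlen, solution_alt]
    rw [key]
    simp [List.zip, List.foldl, fightA]
  · simp only [solution, if_neg hlen, solution_alt, hz]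
    rw [key, List.foldl_cons]
    rfl

-- ===== VERDICT (by name: the statement is the Claim_ definition above) =====
theorem solution_spec : Claim_equal_solution := by
  intro A B _ hpre
  unfold Spec_solution
  exact solution_eq A B hpre.1 hpre.2
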